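-- pv_equiv track=rewrite | github.com/lienordni/ProjectEuler | 269.py | ir
-- ===== SOURCE A (Python) =====
-- def factors(n):
-- 	l=[]
-- 	for i in range(1,n+1):
-- 		if n%i==0:
-- 			l.append(i)
-- 	return l
--
-- def pir(a): # a=a0
-- 	q=[]
-- 	for i in factors(a):
-- 		q+=[-i]
-- 	q.sort()
-- 	return q
--
-- def lien(x): # Needs nothing
-- 	li=list(str(x))
-- 	for i in range(0,len(li)):
-- 		li[i]=int(li[i])
-- 	return li
--
-- def f(n,x):
-- 	a=lien(n)
-- 	a.reverse()
-- 	s=0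
-- 	for i in range(0,len(a)):
-- 		s+=a[i]*(x**i)
-- 	return s
--
-- def ir(n):
-- 	a=n%10
-- 	if a==0:
-- 		return True
-- 	l=pir(a)
-- 	for i in l:
-- 		if f(n,i)==0:
-- 			return True
-- 	return False
-- ===== SOURCE B (Python) =====
-- def ir(n):
--     r = n % 10
--     if r == 0:
--         return True
--     for d in range(1, r + 1):
--         if r % d != 0:
--             continue
--         x = -d
--         val = 0
--         for ch in str(n):
--             val = val * x + int(ch)
--         if val == 0:
--             return True
--     return False
-- ===== Notes on version B (the rewrite author's own statement) =====
-- stated objective: simpler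
-- what changed: B inlines the divisor scan (1..n%10) and evaluates the digit polynomial by Horner's method with a running accumulator over str(n) most-significant-first, replacing A's factor-list/negation/sort helpers, reversed digit list and explicit x**i power sums.
import Mathlib
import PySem

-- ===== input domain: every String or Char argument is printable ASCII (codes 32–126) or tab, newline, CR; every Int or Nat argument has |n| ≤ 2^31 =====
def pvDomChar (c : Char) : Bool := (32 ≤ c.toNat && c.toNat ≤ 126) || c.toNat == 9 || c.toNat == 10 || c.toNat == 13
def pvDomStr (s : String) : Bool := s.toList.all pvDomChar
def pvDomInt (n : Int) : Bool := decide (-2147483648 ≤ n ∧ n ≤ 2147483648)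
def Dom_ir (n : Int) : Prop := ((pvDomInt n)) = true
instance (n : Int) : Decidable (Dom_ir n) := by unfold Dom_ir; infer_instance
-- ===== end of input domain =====

-- B replaces A's factor-list construction, reversed digit list and explicit x**i power
-- sums by an inlined divisor scan with Horner evaluation of the digit polynomial (simpler).

-- ===== PORT A =====
-- factors(n): collect i in 1..n with n % i == 0
def pvFactors (m : Int) : List Int :=
  (PySem.List.pyRange 1 (m + 1) 1).foldl
    (fun l i => if PySem.Int.mod m i == 0 then l ++ [i] else l) []

-- pir(a): q = [-i for i in factors(a)]; q.sort()
def pvPir (a : Int) : List Int :=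
  let q := (pvFactors a).foldl (fun q i => q ++ [-i]) []
  PySem.List.sorted q (fun x => x) false

-- lien(x): list of digits of str(x); int('-') would raise, outside Pre_ we use getD 0
def pvLien (x : Int) : List Int :=
  (PySem.Int.toChars x).map (fun c => (PySem.Int.ofChars? [c]).getD 0)

-- f(n,x): a = lien(n); a.reverse(); s = sum of a[i] * x**i
def pvF (n x : Int) : Int :=
  let a := (pvLien n).reverse
  (PySem.List.pyRange 0 a.length 1).foldl
    (fun s i => s + PySem.List.pyGetD a i 0 * x ^ i.toNat) 0

def ir (n : Int) : Bool :=
  let a := PySem.Int.mod n 10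
  if a == 0 then true
  else (pvPir a).any (fun i => pvF n i == 0)

-- ===== PORT B =====
-- Horner: val = 0; for ch in str(n): val = val*x + int(ch)
def pvHorner (n x : Int) : Int :=
  (PySem.Int.toChars n).foldl
    (fun val ch => val * x + (PySem.Int.ofChars? [ch]).getD 0) 0

def ir_alt (n : Int) : Bool :=
  let r := PySem.Int.mod n 10
  if r == 0 then true
  else (PySem.List.pyRange 1 (r + 1) 1).any (fun d =>
    if !(PySem.Int.mod r d == 0) then false
    else pvHorner n (-d) == 0)

-- ===== PRECONDITION & SPEC =====
-- Pre_ excludes negative n whose last digit is nonzero: there Python A (and also B) raises ValueError on int('-') before returning.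
def Pre_ir (n : Int) : Prop := 0 ≤ n ∨ PySem.Int.mod n 10 = 0
instance (n : Int) : Decidable (Pre_ir n) := by unfold Pre_ir; infer_instance
def pvWitness_ir : Int := 48

def Spec_ir (n : Int) (out : Bool) : Prop := out = ir_alt n
instance (n : Int) (out : Bool) : Decidable (Spec_ir n out) := by unfold Spec_ir; infer_instance

-- ===== CLAIM (what is proved, stated in full; the proofs are below) =====
def Claim_equal_ir : Prop := ∀ (n : Int), Dom_ir n → Pre_ir n → Spec_ir n (ir n)

-- ===== LEMMAS AND PROOFS =====

-- A's power sum over the reversed coefficient list equals B's Horner fold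
theorem pv_powsum_eq_horner (l : List Int) (x : Int) :
    ((List.range l.length).map (fun i => l.reverse.getD i 0 * x ^ i)).sum
      = l.foldl (fun v a => v * x + a) 0 := by
  have hfold : ∀ (t : List Int) (acc : Int),
      t.foldl (fun v a => v * x + a) acc
        = acc * x ^ t.length + t.foldl (fun v a => v * x + a) 0 := by
    intro t
    induction t with
    | nil => intro acc; simp
    | cons b t ih2 =>
      intro acc
      simp only [List.foldl_cons, List.length_cons]
      rw [ih2 (acc * x + b), ih2 (0 * x + b), pow_succ]
      ring
  induction l with
  | nil => simp
  | cons a t ih =>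
    have hmap : (List.range t.length).map (fun i => (a :: t).reverse.getD i 0 * x ^ i)
        = (List.range t.length).map (fun i => t.reverse.getD i 0 * x ^ i) := by
      apply List.map_congr_left
      intro i hi
      have hi' : i < t.length := List.mem_range.mp hi
      have : (a :: t).reverse.getD i 0 = t.reverse.getD i 0 := by
        simp only [List.reverse_cons]
        rw [List.getD_eq_getElem?_getD, List.getD_eq_getElem?_getD,
          List.getElem?_append_left (by simpa using hi')]
      rw [this]
    have hlast : (a :: t).reverse.getD t.length 0 = a := by
      simp only [List.reverse_cons]
      rw [List.getD_eq_getElem?_getD,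
        List.getElem?_append_right (by simp)]
      simp
    rw [show (a :: t).length = t.length + 1 from rfl, List.range_succ, List.map_append,
      List.sum_append, hmap, ih]
    simp only [List.map_cons, List.map_nil, List.sum_cons, List.sum_nil, hlast,
      List.foldl_cons]
    rw [hfold t (0 * x + a)]
    ring

-- pvF equals pvHorner for every n and x
theorem pvF_eq_horner (n x : Int) : pvF n x = pvHorner n x := by
  unfold pvF pvHorner pvLien
  set l := (PySem.Int.toChars n).map (fun c => (PySem.Int.ofChars? [c]).getD 0) with hl
  have hfold :
      (PySem.List.pyRange 0 (l.reverse.length) 1).foldl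
        (fun s i => s + PySem.List.pyGetD l.reverse i 0 * x ^ i.toNat) 0
      = ((List.range l.reverse.length).map (fun i => l.reverse.getD i 0 * x ^ i)).sum := by
    rw [PySem.List.pyRange_zero_nat, List.foldl_map]
    simp only [PySem.List.pyGetD_natCast, Int.toNat_natCast]
    rw [PySem.List.foldl_add]
    simp
  rw [hfold, List.length_reverse, pv_powsum_eq_horner l x, hl, List.foldl_map]

-- membership in pir a: exactly the negated divisors from 1..a
theorem pv_mem_pir (a i : Int) :
    i ∈ pvPir a ↔ ∃ d, d ∈ PySem.List.pyRange 1 (a + 1) 1 ∧ PySem.Int.mod a d = 0 ∧ i = -d := by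
  unfold pvPir pvFactors
  rw [PySem.List.mem_sorted]
  rw [PySem.List.foldl_append_singleton_eq_map]
  rw [PySem.List.foldl_append_ite_eq_filter]
  simp only [List.nil_append, List.mem_map, List.mem_filter]
  constructor
  · rintro ⟨d, ⟨hd, hdvd⟩, rfl⟩
    exact ⟨d, hd, by simpa using hdvd, rfl⟩
  · rintro ⟨d, hd, hdvd, rfl⟩
    exact ⟨d, ⟨hd, by simpa using hdvd⟩, rfl⟩

-- ===== VERDICT (by name: the statement is the Claim_ definition above) =====
theorem ir_spec : Claim_equal_ir := by
  intro n _ _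
  unfold Spec_ir ir ir_alt
  by_cases h : PySem.Int.mod n 10 = 0
  · simp only [h, beq_self_eq_true, if_true]
  · simp only [beq_iff_eq]
    rw [if_neg h, if_neg h]
    rw [Bool.eq_iff_iff]
    simp only [List.any_eq_true]
    constructor
    · rintro ⟨i, hi, hzero⟩
      obtain ⟨d, hd, hdvd, rfl⟩ := (pv_mem_pir _ _).mp hi
      refine ⟨d, hd, ?_⟩
      rw [hdvd]
      simp only [beq_self_eq_true, Bool.not_true, Bool.false_eq_true, if_false]
      rw [← pvF_eq_horner]
      exact hzero
    · rintro ⟨d, hd, hval⟩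
      by_cases hdvd : PySem.Int.mod (PySem.Int.mod n 10) d = 0
      · refine ⟨-d, (pv_mem_pir _ _).mpr ⟨d, hd, hdvd, rfl⟩, ?_⟩
        rw [hdvd] at hval
        simp only [beq_self_eq_true, Bool.not_true, Bool.false_eq_true, if_false] at hval
        rw [pvF_eq_horner]
        exact hval
      · exfalso
        have hc : (PySem.Int.mod (PySem.Int.mod n 10) d == 0) = false :=
          beq_eq_false_iff_ne.mpr hdvd
        rw [if_pos (by rw [hc]; rfl)] at hval
        exact Bool.false_ne_true hval
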